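-- pv_equiv track=rewrite | github.com/saharadoesdev/codepath-tip102-solutions | Week 02/Session 2 (02-02)/standard_problems.py | navigate_research_station
-- ===== SOURCE A (Python) =====
-- def navigate_research_station(station_layout, observations):
--     distance = 0
--     location = 0    # starts at index 0
--     for letter in observations:
--         i = station_layout.index(letter) # location we want to go to
--         distance += abs(i - location)
--         location = i
--
--     return distance
-- ===== SOURCE B (Python) =====
-- def navigate_research_station(station_layout, observations):
--     # Different algorithm: instead of accumulating |i - location| per move, count, for each
--     # gap between adjacent layout positions, how many moves cross it; the total distance is
--     # the total number of gap crossings (each move from lo to hi crosses gaps lo..hi-1 once).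
--     gaps = [0] * max(len(station_layout) - 1, 0)
--     location = 0
--     for letter in observations:
--         i = station_layout.index(letter)
--         lo, hi = (location, i) if location <= i else (i, location)
--         for k in range(lo, hi):
--             gaps[k] += 1
--         location = i
--     return sum(gaps)
-- ===== Notes on version B (the rewrite author's own statement) =====
-- stated objective: alternative
-- what changed: Replaces per-move distance accumulation with a gap-crossing count: an array with one counter per gap between adjacent layout positions is incremented for every gap each move crosses, and the answer is the sum of all counters.
import Mathlib
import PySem

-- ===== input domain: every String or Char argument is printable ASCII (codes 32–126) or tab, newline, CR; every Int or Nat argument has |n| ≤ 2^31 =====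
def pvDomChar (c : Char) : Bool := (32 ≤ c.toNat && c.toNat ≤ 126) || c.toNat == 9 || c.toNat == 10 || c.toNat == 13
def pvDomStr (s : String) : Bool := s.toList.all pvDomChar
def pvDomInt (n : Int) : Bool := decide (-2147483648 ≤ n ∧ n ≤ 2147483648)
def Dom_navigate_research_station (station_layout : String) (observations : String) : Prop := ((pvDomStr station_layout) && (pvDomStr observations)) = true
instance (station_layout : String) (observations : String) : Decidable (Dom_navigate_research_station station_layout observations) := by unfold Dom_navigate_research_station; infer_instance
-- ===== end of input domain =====

-- B replaces A's per-move distance accumulation with a different algorithm: a counter per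
-- gap between adjacent layout positions records how many moves cross that gap, and the
-- answer is the sum of all counters (objective: alternative).
-- Pre_ excludes observations with a letter absent from station_layout, where A raises ValueError.

-- ===== PORT A =====
-- the for-loop of A, threading (distance, location); none = ValueError from .index
def pvGoA (layout : List Char) : List Char → Int → Int → Option Int
  | [], distance, _ => some distance
  | letter :: rest, distance, location =>
      match PySem.List.index? layout letter with
      | none => none
      | some i => pvGoA layout rest (distance + |(i : Int) - location|) (i : Int)

def navigate_research_station (station_layout : String) (observations : String) : Int :=
  (pvGoA station_layout.toList observations.toList 0 0).getD 0

-- ===== PORT B =====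
-- gaps[k] += 1; exact since B only calls it with 0 ≤ k < len(gaps)
def pvBump (g : List Int) (k : Nat) : List Int := g.set k (g.getD k 0 + 1)

-- B's loop, threading (gaps, location); none = ValueError from .index.
-- range(lo, hi) is ported as List.range' lo (hi - lo) (exact since 0 ≤ lo ≤ hi here).
def pvGoB (layout : List Char) : List Char → List Int → Nat → Option (List Int)
  | [], g, _ => some g
  | letter :: rest, g, location =>
      match PySem.List.index? layout letter with
      | none => none
      | some i =>
          let p := if location ≤ i then (location, i) else (i, location)
          pvGoB layout rest ((List.range' p.1 (p.2 - p.1)).foldl pvBump g) i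

-- [0] * max(len(station_layout) - 1, 0): Nat subtraction is exactly Python's max(·-1, 0)
def navigate_research_station_alt (station_layout : String) (observations : String) : Int :=
  match pvGoB station_layout.toList observations.toList
        (List.replicate (station_layout.toList.length - 1) 0) 0 with
  | none => 0
  | some g => g.sum

-- ===== PRECONDITION & SPEC =====
-- Pre_ excludes exactly the inputs where some observed letter is not in the layout: there A raises ValueError.
def Pre_navigate_research_station (station_layout : String) (observations : String) : Prop :=
  observations.toList.all (fun c => station_layout.toList.contains c) = true
instance (station_layout : String) (observations : String) : Decidable (Pre_navigate_research_station station_layout observations) := by unfold Pre_navigate_research_station; infer_instance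
def pvWitness_navigate_research_station : String × String := ("abc", "cabcb")

def Spec_navigate_research_station (station_layout : String) (observations : String) (out : Int) : Prop := out = navigate_research_station_alt station_layout observations
instance (station_layout : String) (observations : String) (out : Int) : Decidable (Spec_navigate_research_station station_layout observations out) := by unfold Spec_navigate_research_station; infer_instance

-- ===== CLAIM (what is proved, stated in full; the proofs are below) =====
def Claim_equal_navigate_research_station : Prop := ∀ (station_layout : String) (observations : String), Dom_navigate_research_station station_layout observations → Pre_navigate_research_station station_layout observations → Spec_navigate_research_station station_layout observations (navigate_research_station station_layout observations)

-- ===== LEMMAS AND PROOFS =====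

-- incrementing one in-range entry adds 1 to the sum and keeps the length
theorem pvBump_sum (g : List Int) (k : Nat) (hk : k < g.length) :
    (pvBump g k).sum = g.sum + 1 ∧ (pvBump g k).length = g.length := by
  induction g generalizing k with
  | nil => simp at hk
  | cons a t ih =>
      cases k with
      | zero =>
          refine ⟨?_, by simp [pvBump]⟩
          simp [pvBump]; ring
      | succ k =>
          have hk' : k < t.length := by simp at hk; exact hk
          obtain ⟨h1, h2⟩ := ih k hk'
          unfold pvBump at h1 h2 ⊢
          refine ⟨?_, by simpa using h2⟩
          simp only [List.set_cons_succ, List.sum_cons, List.getD, List.getElem?_cons_succ]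
          simp only [List.getD] at h1
          rw [h1]; ring

-- incrementing every entry in [lo, lo+n) adds n to the sum and keeps the length
theorem pvBumpRange_sum (n : Nat) : ∀ (lo : Nat) (g : List Int), lo + n ≤ g.length →
    ((List.range' lo n).foldl pvBump g).sum = g.sum + n ∧
    ((List.range' lo n).foldl pvBump g).length = g.length := by
  induction n with
  | zero => intro lo g _; simp
  | succ n ih =>
      intro lo g hb
      rw [List.range'_succ, List.foldl_cons]
      have hk : lo < g.length := by omega
      have h1 := pvBump_sum g lo hk
      have h2 := ih (lo + 1) (pvBump g lo) (by omega)
      refine ⟨?_, by rw [h2.2, h1.2]⟩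
      rw [h2.1, h1.1]; push_cast; ring

-- index? returns a valid index
theorem pvIndex_lt (layout : List Char) (c : Char) (i : Nat)
    (h : PySem.List.index? layout c = some i) : i < layout.length := by
  obtain ⟨hk, -, -⟩ := PySem.List.getElem_of_index?_eq_some h
  exact hk

-- A's accumulator loop equals B's gap-crossing loop, up to summing the counters
theorem pvGoAB (layout : List Char) : ∀ (cs : List Char) (d : Int) (loc : Nat) (g : List Int),
    (loc = 0 ∨ loc < layout.length) → g.length = layout.length - 1 →
    pvGoA layout cs d (loc : Int) = (pvGoB layout cs g loc).map (fun g' => d + (g'.sum - g.sum)) := by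
  intro cs
  induction cs with
  | nil => intro d loc g _ _; simp [pvGoA, pvGoB]
  | cons c rest ih =>
      intro d loc g hloc hg
      cases hi : PySem.List.index? layout c with
      | none =>
          rw [PySem.List.index?_eq_idxOf?] at hi
          rw [pvGoA, pvGoB, PySem.List.index?_eq_idxOf?, hi]
          rfl
      | some i =>
          have hilt : i < layout.length := pvIndex_lt layout c i hi
          have hloc' : loc < layout.length := by omega
          have hi' := hi
          rw [PySem.List.index?_eq_idxOf?] at hi'
          rw [pvGoA, pvGoB, PySem.List.index?_eq_idxOf?, hi']
          simp only []
          by_cases hle : loc ≤ i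
          · have hb : loc + (i - loc) ≤ g.length := by omega
            have hr := pvBumpRange_sum (i - loc) loc g hb
            rw [if_pos hle]
            rw [ih (d + |(i : Int) - loc|) i _ (Or.inr hilt) (by rw [hr.2, hg])]
            apply congrArg (Option.map · _)
            funext g'
            have habs : |(i : Int) - loc| = ((i - loc : Nat) : Int) := by
              rw [abs_of_nonneg (by omega)]; omega
            rw [hr.1, habs]; ring
          · have hb : i + (loc - i) ≤ g.length := by omega
            have hr := pvBumpRange_sum (loc - i) i g hb
            rw [if_neg hle]
            rw [ih (d + |(i : Int) - loc|) i _ (Or.inr hilt) (by rw [hr.2, hg])]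
            apply congrArg (Option.map · _)
            funext g'
            have habs : |(i : Int) - loc| = ((loc - i : Nat) : Int) := by
              rw [abs_of_nonpos (by omega)]; omega
            rw [hr.1, habs]; ring

-- when every observed letter occurs in the layout, A's loop returns a value
theorem pvGoA_isSome (layout : List Char) (cs : List Char)
    (h : ∀ c ∈ cs, c ∈ layout) : ∀ (d loc : Int), ∃ r, pvGoA layout cs d loc = some r := by
  induction cs with
  | nil => intro d loc; exact ⟨d, rfl⟩
  | cons c rest ih =>
      intro d loc
      have hc : c ∈ layout := h c (List.mem_cons_self ..)
      obtain ⟨i, hi⟩ := Option.isSome_iff_exists.mp ((PySem.List.index?_isSome_iff layout c).mpr hc)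
      obtain ⟨r, hr⟩ := ih (fun x hx => h x (List.mem_cons_of_mem _ hx)) (d + |(i : Int) - loc|) i
      refine ⟨r, ?_⟩
      rw [PySem.List.index?_eq_idxOf?] at hi
      rw [pvGoA, PySem.List.index?_eq_idxOf?, hi]
      exact hr

-- ===== VERDICT (by name: the statement is the Claim_ definition above) =====
theorem navigate_research_station_spec : Claim_equal_navigate_research_station := by
  intro sl obs _ hpre
  unfold Spec_navigate_research_station
  have hpre' : ∀ c ∈ obs.toList, c ∈ sl.toList := by
    intro c hc
    have := List.all_eq_true.mp hpre c hc
    simpa using this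
  obtain ⟨r, hr⟩ := pvGoA_isSome sl.toList obs.toList hpre' 0 0
  have hAB := pvGoAB sl.toList obs.toList 0 0 (List.replicate (sl.toList.length - 1) 0)
      (Or.inl rfl) (by simp)
  rw [Int.cast_ofNat_Int, hr] at hAB
  unfold navigate_research_station navigate_research_station_alt
  cases hB : pvGoB sl.toList obs.toList (List.replicate (sl.toList.length - 1) 0) 0 with
  | none => rw [hB] at hAB; simp at hAB
  | some g =>
      rw [hB] at hAB
      simp at hAB
      rw [hr]
      simp [hAB]
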